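-- pv_equiv track=rewrite | github.com/eWaterCycle/projects | book/thesis_projects/BSc/2025_Q4_ElkeSchokking_CEG/work in progress/critical_days_module.py | classify_discharge_status
-- ===== SOURCE A (Python) =====
-- def classify_discharge_status(discharge_values):
--     statuses = []
--     consecutive_low_days = 0
--
--     for value in discharge_values:
--         if value < 500:
--             consecutive_low_days += 1
--             if 1 <= consecutive_low_days <= 3:
--                 status = "caution"
--             elif 4 <= consecutive_low_days <= 7:
--                 status = "risk"
--             else:
--                 status = "critical"
--         else:
--             consecutive_low_days = 0
--             status = "normal"
--         statuses.append(status)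
--
--     return statuses
-- ===== SOURCE B (Python) =====
-- def classify_discharge_status(discharge_values):
--     # Run-based decomposition: split into maximal consecutive low/high runs,
--     # label each low run by 1-based position within the run.
--     out = []
--     i, n = 0, len(discharge_values)
--     while i < n:
--         low = discharge_values[i] < 500
--         j = i
--         while j < n and (discharge_values[j] < 500) == low:
--             j += 1
--         if low:
--             for k in range(1, j - i + 1):
--                 out.append("caution" if k <= 3 else "risk" if k <= 7 else "critical")
--         else:
--             out.extend(["normal"] * (j - i))
--         i = j
--     return out
-- ===== Notes on version B (the rewrite author's own statement) =====
-- stated objective: alternative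
-- what changed: Replaces A's single pass with a running consecutive-low-day counter by a run-based decomposition: the list is split into maximal consecutive runs of low/non-low values, each low run is labelled by 1-based position within the run and each non-low run emits a block of 'normal'.
import Mathlib
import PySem

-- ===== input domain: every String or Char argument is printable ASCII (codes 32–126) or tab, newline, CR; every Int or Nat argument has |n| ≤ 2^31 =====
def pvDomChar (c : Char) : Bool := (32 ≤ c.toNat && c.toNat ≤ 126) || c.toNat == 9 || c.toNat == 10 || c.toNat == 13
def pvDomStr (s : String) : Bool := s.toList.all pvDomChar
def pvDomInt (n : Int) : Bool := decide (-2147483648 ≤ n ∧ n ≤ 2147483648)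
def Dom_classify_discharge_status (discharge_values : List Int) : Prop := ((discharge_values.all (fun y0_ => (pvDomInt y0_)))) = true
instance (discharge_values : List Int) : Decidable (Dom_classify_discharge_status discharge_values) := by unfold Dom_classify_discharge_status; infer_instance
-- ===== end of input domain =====

-- B replaces A's running low-day counter with a run-based decomposition (split into
-- maximal consecutive low/high runs, label each low run by 1-based position); objective: alternative.


-- ===== PORT A =====
def classify_discharge_status (discharge_values : List Int) : List String :=
  (discharge_values.foldl
    (fun (st : List String × Int) value =>
      if value < 500 then
        let c := st.2 + 1
        let status := if 1 ≤ c ∧ c ≤ 3 then "caution"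
          else if 4 ≤ c ∧ c ≤ 7 then "risk" else "critical"
        (st.1 ++ [status], c)
      else
        (st.1 ++ ["normal"], (0 : Int)))
    ([], 0)).1

-- ===== PORT B =====
-- label for the k-th (1-based) day of a low run
def pvLabel (k : Nat) : String :=
  if k ≤ 3 then "caution" else if k ≤ 7 then "risk" else "critical"

def classify_discharge_status_alt : List Int → List String
  | [] => []
  | v :: rest =>
    let low : Bool := decide (v < 500)
    let run := rest.takeWhile (fun x => decide (x < 500) == low)
    let after := rest.dropWhile (fun x => decide (x < 500) == low)
    (if low then (List.range (run.length + 1)).map (fun i => pvLabel (i + 1))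
     else List.replicate (run.length + 1) "normal") ++ classify_discharge_status_alt after
termination_by xs => xs.length
decreasing_by
  have := (List.dropWhile_sublist (p := fun x => decide (x < 500) == (decide (v < 500) : Bool)) (l := rest)).length_le
  simp only [List.length_cons]
  omega

-- ===== PRECONDITION & SPEC =====
def Spec_classify_discharge_status (discharge_values : List Int) (out : List String) : Prop := out = classify_discharge_status_alt discharge_values
instance (discharge_values : List Int) (out : List String) : Decidable (Spec_classify_discharge_status discharge_values out) := by unfold Spec_classify_discharge_status; infer_instance

-- ===== CLAIM (what is proved, stated in full; the proofs are below) =====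
def Claim_equal_classify_discharge_status : Prop := ∀ (discharge_values : List Int), Dom_classify_discharge_status discharge_values → Spec_classify_discharge_status discharge_values (classify_discharge_status discharge_values)

-- ===== LEMMAS AND PROOFS =====

-- middle form: structural recursion carrying the counter, as A's loop does
def pvLabelInt (c : Int) : String :=
  if 1 ≤ c ∧ c ≤ 3 then "caution" else if 4 ≤ c ∧ c ≤ 7 then "risk" else "critical"

def pvGo (c : Int) : List Int → List String
  | [] => []
  | v :: rest =>
    if v < 500 then pvLabelInt (c + 1) :: pvGo (c + 1) rest
    else "normal" :: pvGo 0 rest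

theorem pvA_foldl (xs : List Int) : ∀ (acc : List String) (c : Int),
    (xs.foldl
      (fun (st : List String × Int) value =>
        if value < 500 then
          let c := st.2 + 1
          let status := if 1 ≤ c ∧ c ≤ 3 then "caution"
            else if 4 ≤ c ∧ c ≤ 7 then "risk" else "critical"
          (st.1 ++ [status], c)
        else
          (st.1 ++ ["normal"], (0 : Int)))
      (acc, c)).1 = acc ++ pvGo c xs := by
  induction xs with
  | nil => intro acc c; simp [pvGo]
  | cons v rest ih =>
    intro acc c
    simp only [List.foldl_cons]
    by_cases h : v < 500
    · simp only [if_pos h]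
      rw [ih]
      simp [pvGo, pvLabelInt, h]
    · simp only [if_neg h]
      rw [ih]
      simp [pvGo, h]

theorem pvA_eq_go (xs : List Int) : classify_discharge_status xs = pvGo 0 xs := by
  have h := pvA_foldl xs [] 0
  simpa [classify_discharge_status] using h

theorem pvGo_cons (c : Int) (v : Int) (rest : List Int) :
    pvGo c (v :: rest)
      = if v < 500 then pvLabelInt (c + 1) :: pvGo (c + 1) rest
        else "normal" :: pvGo 0 rest := rfl

theorem pvGo_low (run : List Int) : ∀ (rest : List Int) (c : Int),
    (∀ x ∈ run, x < 500) →
    pvGo c (run ++ rest)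
      = (List.range run.length).map (fun i : Nat => pvLabelInt (c + 1 + (i : Int)))
        ++ pvGo (c + run.length) rest := by
  induction run with
  | nil => intro rest c _; simp
  | cons r run' ih =>
    intro rest c h
    have hr : r < 500 := h r (by simp)
    have h' : ∀ x ∈ run', x < 500 := fun x hx => h x (by simp [hx])
    rw [List.cons_append, pvGo_cons, if_pos hr, ih rest (c + 1) h']
    simp only [List.length_cons, List.range_succ_eq_map, List.map_cons, List.map_map,
      List.cons_append, Nat.cast_zero, Nat.cast_add, Nat.cast_one]
    congr 1
    · norm_num
    congr 1
    · apply List.map_congr_left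
      intro i _
      simp only [Function.comp]
      congr 1
      push_cast; ring
    · congr 1
      ring

theorem pvGo_high (run : List Int) : ∀ (rest : List Int) (c : Int),
    run ≠ [] → (∀ x ∈ run, ¬ x < 500) →
    pvGo c (run ++ rest) = List.replicate run.length "normal" ++ pvGo 0 rest := by
  induction run with
  | nil => intro _ _ h _; exact absurd rfl h
  | cons r run' ih =>
    intro rest c _ h
    have hr : ¬ r < 500 := h r (by simp)
    cases run' with
    | nil => simp [pvGo, hr]
    | cons s t =>
      have h' : ∀ x ∈ s :: t, ¬ x < 500 := fun x hx => h x (by simp at hx ⊢; tauto)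
      rw [List.cons_append, pvGo_cons, if_neg hr, ih rest 0 (by simp) h']
      simp [List.replicate_succ]

theorem pvGo_reset (c : Int) (xs : List Int) (h : ∀ v ∈ xs.head?, ¬ v < 500) :
    pvGo c xs = pvGo 0 xs := by
  cases xs with
  | nil => rfl
  | cons v rest => simp [pvGo, h v (by simp)]

theorem pvDropWhile_head (p : Int → Bool) (l : List Int) :
    ∀ v ∈ (l.dropWhile p).head?, p v = false := by
  induction l with
  | nil => simp
  | cons a t ih =>
    by_cases h : p a = true
    · simpa [List.dropWhile, h] using ih
    · simp at h; simp [List.dropWhile, h]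

theorem pvLabel_eq (i : Nat) : pvLabelInt (0 + 1 + (i : Int)) = pvLabel (i + 1) := by
  unfold pvLabelInt pvLabel
  split_ifs <;> first | rfl | omega

theorem pvGo_eq_alt : ∀ (n : Nat) (xs : List Int), xs.length ≤ n →
    pvGo 0 xs = classify_discharge_status_alt xs := by
  intro n
  induction n with
  | zero =>
    intro xs h
    have : xs = [] := List.eq_nil_of_length_eq_zero (Nat.le_zero.mp h)
    subst this
    simp [pvGo, classify_discharge_status_alt]
  | succ n ih =>
    intro xs hlen
    cases xs with
    | nil => simp [pvGo, classify_discharge_status_alt]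
    | cons v rest =>
      set p : Int → Bool := fun x => decide (x < 500) == (decide (v < 500) : Bool) with hp
      have hsplit : rest.takeWhile p ++ rest.dropWhile p = rest := List.takeWhile_append_dropWhile
      have hafterlen : (rest.dropWhile p).length ≤ n := by
        have := (List.dropWhile_sublist (p := p) (l := rest)).length_le
        simp only [List.length_cons] at hlen; omega
      have hhead : ∀ w ∈ (rest.dropWhile p).head?, p w = false := pvDropWhile_head p rest
      have hih := ih (rest.dropWhile p) hafterlen
      by_cases hv : v < 500
      · have hrun : ∀ x ∈ v :: rest.takeWhile p, x < 500 := by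
          intro x hx
          rcases List.mem_cons.mp hx with h | h
          · exact h ▸ hv
          · have := List.mem_takeWhile_imp h
            simp [hp, hv] at this; exact this
        have hreset : ∀ w ∈ (rest.dropWhile p).head?, ¬ w < 500 := by
          intro w hw
          have := hhead w hw
          simp [hp, hv] at this; omega
        have hstep : pvGo 0 (v :: rest)
            = (List.range ((rest.takeWhile p).length + 1)).map (fun i => pvLabel (i + 1))
              ++ pvGo 0 (rest.dropWhile p) := by
          rw [show v :: rest = (v :: rest.takeWhile p) ++ rest.dropWhile p from by simp [hsplit]]
          rw [pvGo_low _ _ 0 hrun, pvGo_reset _ _ hreset]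
          congr 1
          simp only [List.length_cons]
          apply List.map_congr_left
          intro i _
          exact pvLabel_eq i
        rw [hstep, hih]
        simp only [classify_discharge_status_alt]
        simp [hp, hv]
      · have hrun : ∀ x ∈ v :: rest.takeWhile p, ¬ x < 500 := by
          intro x hx
          rcases List.mem_cons.mp hx with h | h
          · exact h ▸ hv
          · have := List.mem_takeWhile_imp h
            simp [hp, hv] at this; omega
        have hstep : pvGo 0 (v :: rest)
            = List.replicate ((rest.takeWhile p).length + 1) "normal" ++ pvGo 0 (rest.dropWhile p) := by
          rw [show v :: rest = (v :: rest.takeWhile p) ++ rest.dropWhile p from by simp [hsplit]]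
          simpa using pvGo_high (v :: rest.takeWhile p) (rest.dropWhile p) 0 (by simp) hrun
        rw [hstep, hih]
        simp only [classify_discharge_status_alt]
        simp [hp, hv]

-- ===== VERDICT (by name: the statement is the Claim_ definition above) =====
theorem classify_discharge_status_spec : Claim_equal_classify_discharge_status := by
  intro xs _
  unfold Spec_classify_discharge_status
  rw [pvA_eq_go]
  exact pvGo_eq_alt xs.length xs le_rfl
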